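-- pv_equiv track=rewrite | github.com/thom-heinrich/twinr | src/twinr/web/store.py | _quote_env_value
-- ===== SOURCE A (Python) =====
-- def _quote_env_value(value: str) -> str:
--     # AUDIT-FIX(#2): Preserve leading/trailing spaces and escape control characters/newlines to prevent file corruption.
--     _validate_env_value(value)
--     if value == "":
--         return '""'
--
--     needs_quotes = (
--         value != value.strip()
--         or any(char.isspace() for char in value)
--         or any(char in value for char in ["#", '"', "'", "\\"])
--     )
--     if not needs_quotes:
--         return value
--
--     escaped = (
--         value.replace("\\", "\\\\")
--         .replace("\n", "\\n")
--         .replace("\r", "\\r")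
--         .replace("\t", "\\t")
--         .replace('"', '\\"')
--     )
--     return f'"{escaped}"'
--
-- def _validate_env_value(value: str) -> str:
--     # AUDIT-FIX(#2): NUL bytes are not valid in text-backed config files and must be rejected.
--     if not isinstance(value, str):
--         raise TypeError("Environment variable values must be strings")
--     if "\x00" in value:
--         raise ValueError("Environment variable values may not contain NUL bytes")
--     return value
-- ===== SOURCE B (Python) =====
-- def _validate_env_value(value: str) -> str:
--     if not isinstance(value, str):
--         raise TypeError("Environment variable values must be strings")
--     if "\x00" in value:
--         raise ValueError("Environment variable values may not contain NUL bytes")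
--     return value
--
--
-- def _quote_env_value(value: str) -> str:
--     # Single pass: decide whether quoting is needed and build the escaped text
--     # in the same traversal (A scans the string several times and chains five replaces).
--     _validate_env_value(value)
--     if value == "":
--         return '""'
--     needs_quotes = False
--     out = []
--     for ch in value:
--         if ch.isspace() or ch in '#"\'\\':
--             needs_quotes = True
--         if ch == "\\":
--             out.append("\\\\")
--         elif ch == "\n":
--             out.append("\\n")
--         elif ch == "\r":
--             out.append("\\r")
--         elif ch == "\t":
--             out.append("\\t")
--         elif ch == '"':
--             out.append('\\"')
--         else:
--             out.append(ch)
--     if not needs_quotes: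
--         return value
--     return '"' + "".join(out) + '"'
-- ===== Notes on version B (the rewrite author's own statement) =====
-- stated objective: alternative
-- what changed: Replaced A's multiple whole-string predicate scans (strip comparison, isspace scan, four membership scans) and five chained .replace passes by a single character loop that sets the needs-quotes flag and emits each character's escape in one traversal.
import Mathlib
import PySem

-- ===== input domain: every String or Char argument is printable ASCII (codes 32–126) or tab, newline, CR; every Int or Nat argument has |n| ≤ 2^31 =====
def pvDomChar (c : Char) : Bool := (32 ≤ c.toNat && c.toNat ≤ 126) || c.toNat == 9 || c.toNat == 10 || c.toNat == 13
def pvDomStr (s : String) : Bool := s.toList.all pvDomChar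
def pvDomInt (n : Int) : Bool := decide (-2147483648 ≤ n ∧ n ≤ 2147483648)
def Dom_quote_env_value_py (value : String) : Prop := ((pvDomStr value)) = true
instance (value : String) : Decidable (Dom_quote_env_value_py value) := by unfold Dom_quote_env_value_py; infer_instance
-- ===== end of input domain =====

-- B fuses A's multiple predicate scans and five chained .replace passes into one
-- traversal that decides quoting and builds the escaped text at once (objective: alternative).

-- ===== PORT A =====
-- _validate_env_value raises only on non-str input / NUL bytes; NUL is outside the
-- input domain, so on Dom the call returns its argument and is ported as a no-op.
def quote_env_value_py (value : String) : String :=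
  if value = "" then String.ofList ['"', '"']
  else
    let cs := value.toList
    let needs_quotes :=
      (!(cs == PySem.Chars.strip cs)) || cs.any PySem.Chars.isspace ||
        ([['#'], ['"'], ['\''], ['\\']].any (fun c => PySem.Chars.isIn c cs))
    if !needs_quotes then value
    else
      let escaped :=
        PySem.Chars.replace (PySem.Chars.replace (PySem.Chars.replace (PySem.Chars.replace
          (PySem.Chars.replace cs ['\\'] ['\\', '\\']) ['\n'] ['\\', 'n']) ['\r'] ['\\', 'r'])
          ['\t'] ['\\', 't']) ['"'] ['\\', '"']
      String.ofList ('"' :: escaped ++ ['"'])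

-- ===== PORT B =====
def pvEsc (c : Char) : List Char :=
  if c = '\\' then ['\\', '\\']
  else if c = '\n' then ['\\', 'n']
  else if c = '\r' then ['\\', 'r']
  else if c = '\t' then ['\\', 't']
  else if c = '"' then ['\\', '"']
  else [c]

def pvNeedsQuotes (c : Char) : Bool :=
  PySem.Chars.isspace c || c = '#' || c = '"' || c = '\'' || c = '\\'

def quote_env_value_py_alt (value : String) : String :=
  if value = "" then String.ofList ['"', '"']
  else
    let st := value.toList.foldl
      (fun (acc : Bool × List Char) c => (acc.1 || pvNeedsQuotes c, acc.2 ++ pvEsc c)) (false, [])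
    if !st.1 then value else String.ofList ('"' :: st.2 ++ ['"'])

-- ===== PRECONDITION & SPEC =====
def Spec_quote_env_value_py (value : String) (out : String) : Prop := out = quote_env_value_py_alt value
instance (value : String) (out : String) : Decidable (Spec_quote_env_value_py value out) := by unfold Spec_quote_env_value_py; infer_instance

-- ===== CLAIM (what is proved, stated in full; the proofs are below) =====
def Claim_equal_quote_env_value_py : Prop := ∀ (value : String), Dom_quote_env_value_py value → Spec_quote_env_value_py value (quote_env_value_py value)

-- ===== LEMMAS AND PROOFS =====

-- replace with a single-character pattern acts independently on every character
lemma pv_go_singleton (a : Char) (r : List Char) :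
    ∀ (l : List Char) (fuel : Nat) (acc : List Char), l.length ≤ fuel →
      PySem.Chars.replace.go [a] r fuel l acc
        = acc.reverse ++ l.flatMap (fun c => if c = a then r else [c]) := by
  intro l
  induction l with
  | nil => intro fuel acc _; cases fuel <;> simp [PySem.Chars.replace.go]
  | cons c t ih =>
    intro fuel acc h
    cases fuel with
    | zero => simp at h
    | succ f =>
      simp only [PySem.Chars.replace.go]
      by_cases hc : c = a
      · subst hc
        have hpre : [c].isPrefixOf (c :: t) = true := by simp [List.isPrefixOf]
        simp only [hpre]
        rw [show List.drop [c].length (c :: t) = t from rfl,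
            ih f _ (by simpa using h)]
        simp
      · have hpre : [a].isPrefixOf (c :: t) = false := by
          simp [List.isPrefixOf]; exact fun hh => (hc hh.symm).elim
        simp only [hpre, Bool.false_eq_true, if_false]
        rw [ih f _ (by simpa using h)]
        simp [hc]

lemma pv_replace_singleton (cs : List Char) (a : Char) (r : List Char) :
    PySem.Chars.replace cs [a] r = cs.flatMap (fun c => if c = a then r else [c]) := by
  simpa [PySem.Chars.replace] using pv_go_singleton a r cs cs.length [] le_rfl

-- the five chained single-character replaces equal one per-character escape pass
lemma pv_chain_eq_flatMap (cs : List Char) :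
    PySem.Chars.replace (PySem.Chars.replace (PySem.Chars.replace (PySem.Chars.replace
      (PySem.Chars.replace cs ['\\'] ['\\', '\\']) ['\n'] ['\\', 'n']) ['\r'] ['\\', 'r'])
      ['\t'] ['\\', 't']) ['"'] ['\\', '"'] = cs.flatMap pvEsc := by
  simp only [pv_replace_singleton, List.flatMap_assoc]
  induction cs with
  | nil => simp
  | cons c t ih =>
    simp only [List.flatMap_cons, ih, List.append_cancel_right_eq]
    by_cases h1 : c = '\\'
    · subst h1; decide
    · by_cases h2 : c = '\n'
      · subst h2; decide
      · by_cases h3 : c = '\r'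
        · subst h3; decide
        · by_cases h4 : c = '\t'
          · subst h4; decide
          · by_cases h5 : c = '"'
            · subst h5; decide
            · simp [pvEsc, h1, h2, h3, h4, h5]

lemma pv_foldl_or (p : Char → Bool) (cs : List Char) (b : Bool) :
    cs.foldl (fun acc c => acc || p c) b = (b || cs.any p) := by
  induction cs generalizing b with
  | nil => simp
  | cons a t ih => rw [List.foldl_cons, ih, List.any_cons, Bool.or_assoc]

lemma pv_any_or (p q : Char → Bool) (l : List Char) :
    l.any (fun x => p x || q x) = (l.any p || l.any q) := by
  induction l with
  | nil => simp
  | cons a t ih => cases hp : p a <;> cases hq : q a <;> simp [ih, hp, hq]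

lemma pv_dropWhile_eq_self (p : Char → Bool) (l : List Char)
    (h : ∀ c ∈ l, p c = false) : l.dropWhile p = l := by
  cases l with
  | nil => rfl
  | cons a t => exact List.dropWhile_cons_of_neg (by simp [h a (by simp)])

lemma pv_strip_of_no_space (cs : List Char) (h : cs.any PySem.Chars.isspace = false) :
    PySem.Chars.strip cs = cs := by
  have hall : ∀ c ∈ cs, PySem.Chars.isspace c = false := by
    simpa [List.any_eq_false] using h
  have h1 : PySem.Chars.lstrip cs = cs := pv_dropWhile_eq_self _ _ hall
  have h2 : PySem.Chars.rstrip cs = cs := by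
    unfold PySem.Chars.rstrip
    rw [pv_dropWhile_eq_self _ _ (fun c hc => hall c (List.mem_reverse.mp hc)),
        List.reverse_reverse]
  unfold PySem.Chars.strip
  rw [h1, h2]

-- A's quoting condition equals B's per-character flag
lemma pv_cond_eq (cs : List Char) :
    ((!(cs == PySem.Chars.strip cs)) || cs.any PySem.Chars.isspace ||
      ([['#'], ['"'], ['\''], ['\\']].any (fun c => PySem.Chars.isIn c cs)))
      = cs.any pvNeedsQuotes := by
  have hsingle : ∀ (a : Char), PySem.Chars.isIn [a] cs = cs.any (fun c => c == a) := by
    intro a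
    rw [Bool.eq_iff_iff, PySem.Chars.isIn_iff_infix, List.singleton_infix_iff,
        List.any_eq_true]
    constructor
    · exact fun ha => ⟨a, ha, beq_self_eq_true a⟩
    · rintro ⟨x, hx, e⟩
      exact (beq_iff_eq.mp e) ▸ hx
  by_cases h : cs.any PySem.Chars.isspace = true
  · rcases List.any_eq_true.mp h with ⟨c, hc, hs⟩
    rw [h]
    have : cs.any pvNeedsQuotes = true :=
      List.any_eq_true.mpr ⟨c, hc, by simp [pvNeedsQuotes, hs]⟩
    rw [this]
    simp only [Bool.or_true, Bool.true_or]
  · rw [Bool.not_eq_true] at h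
    rw [h, pv_strip_of_no_space cs h]
    have hRHS : cs.any pvNeedsQuotes
        = cs.any (fun c => (((c == '#' || c == '"') || c == '\'') || c == '\\')) := by
      apply PySem.List.any_congr_mem
      intro c hc
      have := List.any_eq_false.mp h c hc
      simp only [pvNeedsQuotes, this, Bool.false_or]
      cases hA : (c == '#') <;> cases hB : (c == '"') <;> cases hC : (c == '\'') <;>
        cases hD : (c == '\\') <;>
        simp_all
    rw [hRHS, pv_any_or (p := fun c => ((c == '#' || c == '"') || c == '\'')),
        pv_any_or (p := fun c => (c == '#' || c == '"')),
        pv_any_or (p := fun c => (c == '#'))]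
    simp only [List.any_cons, List.any_nil, Bool.or_false, hsingle, beq_self_eq_true,
      Bool.not_true, Bool.false_or]
    rw [← Bool.or_assoc, ← Bool.or_assoc]

-- B's paired fold is the flag fold and the escape fold side by side
lemma pv_fold_split (cs : List Char) :
    cs.foldl (fun (acc : Bool × List Char) c => (acc.1 || pvNeedsQuotes c, acc.2 ++ pvEsc c))
        (false, [])
      = (cs.any pvNeedsQuotes, cs.flatMap pvEsc) := by
  rw [PySem.List.foldl_prod_mk (f := fun b c => b || pvNeedsQuotes c)
        (g := fun l c => l ++ pvEsc c)]
  rw [pv_foldl_or, PySem.List.foldl_append_eq_flatMap]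
  simp

-- ===== VERDICT (by name: the statement is the Claim_ definition above) =====
theorem quote_env_value_py_spec : Claim_equal_quote_env_value_py := by
  intro value _
  unfold Spec_quote_env_value_py quote_env_value_py quote_env_value_py_alt
  by_cases hE : value = ""
  · simp [hE]
  · simp only [if_neg hE, pv_fold_split, pv_cond_eq, pv_chain_eq_flatMap]
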